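-- pv_equiv track=rewrite | github.com/II-IMMORTAL-II/tg_bot_music | IMMORTAL_MUSIC/core/mongo.py | _match_condition
-- ===== SOURCE A (Python) =====
-- def _match_condition(value, condition):
--     if not isinstance(condition, dict):
--         return value == condition
--     for op, expected in condition.items():
--         if op == "$gt" and not (value > expected):
--             return False
--         if op == "$lt" and not (value < expected):
--             return False
--         if op == "$gte" and not (value >= expected):
--             return False
--         if op == "$lte" and not (value <= expected):
--             return False
--         if op == "$ne" and not (value != expected):
--             return False
--     return True
-- ===== SOURCE B (Python) =====
-- def _match_condition(value, condition):
--     # Normalise the condition into one interval [lo, hi] plus an exclusion set,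
--     # then test membership once; no per-entry short-circuiting.
--     if not isinstance(condition, dict):
--         return value == condition
--     lows = [e + 1 for op, e in condition.items() if op == "$gt"] \
--          + [e for op, e in condition.items() if op == "$gte"]
--     highs = [e - 1 for op, e in condition.items() if op == "$lt"] \
--           + [e for op, e in condition.items() if op == "$lte"]
--     banned = {e for op, e in condition.items() if op == "$ne"}
--     ok_low = not lows or value >= max(lows)
--     ok_high = not highs or value <= min(highs)
--     return ok_low and ok_high and value not in banned
-- ===== Notes on version B (the rewrite author's own statement) =====
-- stated objective: alternative
-- what changed: Instead of walking the dict and short-circuiting per operator, B normalises all constraints into a single interval (max of lower bounds, min of upper bounds) plus a set of excluded values, then performs one membership test; correct because a conjunction of order constraints on an int equals an interval test.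
import Mathlib
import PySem

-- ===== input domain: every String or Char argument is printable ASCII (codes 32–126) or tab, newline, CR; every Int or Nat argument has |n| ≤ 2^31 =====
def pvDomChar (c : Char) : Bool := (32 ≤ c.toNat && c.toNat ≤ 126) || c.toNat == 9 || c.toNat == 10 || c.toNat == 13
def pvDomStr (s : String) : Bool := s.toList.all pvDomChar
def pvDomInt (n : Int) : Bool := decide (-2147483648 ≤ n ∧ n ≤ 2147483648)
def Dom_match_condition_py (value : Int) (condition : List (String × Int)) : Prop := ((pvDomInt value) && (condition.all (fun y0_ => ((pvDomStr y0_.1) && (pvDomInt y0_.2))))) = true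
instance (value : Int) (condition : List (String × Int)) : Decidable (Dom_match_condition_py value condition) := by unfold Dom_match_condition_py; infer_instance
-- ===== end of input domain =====

-- B normalises the constraints into one interval (max lower bound, min upper bound) plus an exclusion set and does one membership test.
-- ===== PORT A =====
def match_condition_py (value : Int) (condition : List (String × Int)) : Bool :=
  -- the 'not isinstance(condition, dict)' branch never fires: condition is a dict here
  match condition with
  | [] => true
  | (op, expected) :: rest =>
    if op == "$gt" && !(decide (value > expected)) then false
    else if op == "$lt" && !(decide (value < expected)) then false
    else if op == "$gte" && !(decide (value ≥ expected)) then false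
    else if op == "$lte" && !(decide (value ≤ expected)) then false
    else if op == "$ne" && !(decide (value ≠ expected)) then false
    else match_condition_py value rest

-- ===== PORT B =====
def match_condition_py_alt (value : Int) (condition : List (String × Int)) : Bool :=
  let lows := ((condition.filter (fun p => p.1 == "$gt")).map (fun p => p.2 + 1))
           ++ ((condition.filter (fun p => p.1 == "$gte")).map (fun p => p.2))
  let highs := ((condition.filter (fun p => p.1 == "$lt")).map (fun p => p.2 - 1))
            ++ ((condition.filter (fun p => p.1 == "$lte")).map (fun p => p.2))
  let banned := PySem.Set.ofList ((condition.filter (fun p => p.1 == "$ne")).map (fun p => p.2))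
  let okLow := match PySem.List.max? lows (fun x => x) with
               | none => true                             -- 'not lows'
               | some m => decide (value ≥ m)             -- value >= max(lows)
  let okHigh := match PySem.List.min? highs (fun x => x) with
                | none => true
                | some m => decide (value ≤ m)
  okLow && okHigh && !(PySem.Set.contains banned value)

-- ===== PRECONDITION & SPEC =====
def Spec_match_condition_py (value : Int) (condition : List (String × Int)) (out : Bool) : Prop := out = match_condition_py_alt value condition
instance (value : Int) (condition : List (String × Int)) (out : Bool) : Decidable (Spec_match_condition_py value condition out) := by unfold Spec_match_condition_py; infer_instance

-- ===== CLAIM =====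
def Claim_equal_match_condition_py : Prop := ∀ (value : Int) (condition : List (String × Int)), Dom_match_condition_py value condition → Spec_match_condition_py value condition (match_condition_py value condition)

-- ===== LEMMAS AND PROOFS =====

-- per-entry predicate: the check A performs on one (op, expected) pair
def pvEntryOk (value : Int) (p : String × Int) : Bool :=
  if p.1 == "$gt" then decide (value > p.2)
  else if p.1 == "$lt" then decide (value < p.2)
  else if p.1 == "$gte" then decide (value ≥ p.2)
  else if p.1 == "$lte" then decide (value ≤ p.2)
  else if p.1 == "$ne" then decide (value ≠ p.2)
  else true

theorem pvA_eq_all (value : Int) (condition : List (String × Int)) :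
    match_condition_py value condition = condition.all (pvEntryOk value) := by
  induction condition with
  | nil => rfl
  | cons p rest ih =>
    obtain ⟨op, e⟩ := p
    rw [match_condition_py, List.all_cons, ih, pvEntryOk]
    by_cases h1 : op = "$gt"
    · subst h1; by_cases h : value > e <;> simp [h]
    · by_cases h2 : op = "$lt"
      · subst h2; by_cases h : value < e <;> simp [h]
      · by_cases h3 : op = "$gte"
        · subst h3; by_cases h : value ≥ e <;> simp [h]
        · by_cases h4 : op = "$lte"
          · subst h4; by_cases h : value ≤ e <;> simp [h]
          · by_cases h5 : op = "$ne"
            · subst h5; by_cases h : value = e <;> simp [h]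
            · simp [h1, h2, h3, h4, h5]

theorem pv_all_filter_map {α β : Type} (pr : α → Bool) (f : α → β) (q : β → Bool) (l : List α) :
    ((l.filter pr).map f).all q = l.all (fun x => !pr x || q (f x)) := by
  induction l with
  | nil => rfl
  | cons x t ih =>
    by_cases h : pr x = true <;> simp [h, ih]

theorem pv_ge_max (value : Int) (l : List Int) :
    (match PySem.List.max? l (fun x => x) with
     | none => true
     | some m => decide (value ≥ m)) = l.all (fun x => decide (x ≤ value)) := by
  cases hm : PySem.List.max? l (fun x => x) with
  | none =>
    rw [PySem.List.max?_eq_none_iff] at hm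
    subst hm; rfl
  | some m =>
    by_cases h : value ≥ m
    · have hall : ∀ x ∈ l, x ≤ value := fun x hx =>
        le_trans (PySem.List.max?_isMax hm x hx) h
      simp [h, List.all_eq_true]
      exact fun x hx => hall x hx
    · have hmem : m ∈ l := PySem.List.max?_mem hm
      simp only [h, decide_false]
      symm
      rw [List.all_eq_false]
      exact ⟨m, hmem, by simp [h]⟩

theorem pv_le_min (value : Int) (l : List Int) :
    (match PySem.List.min? l (fun x => x) with
     | none => true
     | some m => decide (value ≤ m)) = l.all (fun x => decide (value ≤ x)) := by
  cases hm : PySem.List.min? l (fun x => x) with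
  | none =>
    rw [PySem.List.min?_eq_none_iff] at hm
    subst hm; rfl
  | some m =>
    by_cases h : value ≤ m
    · have hall : ∀ x ∈ l, value ≤ x := fun x hx =>
        le_trans h (PySem.List.min?_isMin hm x hx)
      simp [h, List.all_eq_true]
      exact fun x hx => hall x hx
    · have hmem : m ∈ l := PySem.List.min?_mem hm
      simp only [h, decide_false]
      symm
      rw [List.all_eq_false]
      exact ⟨m, hmem, by simp [h]⟩

theorem pv_not_banned (value : Int) (l : List Int) :
    (!(PySem.Set.contains (PySem.Set.ofList l) value)) = l.all (fun x => decide (value ≠ x)) := by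
  rw [Bool.eq_iff_iff]
  simp [PySem.Set.contains, PySem.Set.mem_ofList, List.all_eq_true]
  constructor
  · intro h x hx he; exact h (he ▸ hx)
  · intro h hc; exact h value hc rfl

theorem pv_all_and {α : Type} (f g : α → Bool) (l : List α) :
    (l.all f && l.all g) = l.all (fun x => f x && g x) := by
  induction l with
  | nil => rfl
  | cons x t ih =>
    simp only [List.all_cons, ← ih]
    by_cases hf : f x <;> by_cases hg : g x <;> simp [hf, hg]

theorem pvB_eq_all (value : Int) (condition : List (String × Int)) :
    match_condition_py_alt value condition = condition.all (pvEntryOk value) := by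
  rw [match_condition_py_alt]
  simp only [pv_ge_max, pv_le_min, pv_not_banned, List.all_append, pv_all_filter_map,
    pv_all_and]
  congr 1
  funext p
  obtain ⟨op, e⟩ := p
  rw [pvEntryOk]
  by_cases h1 : op = "$gt"
  · subst h1
    by_cases h : value > e <;> simp [h]
  · by_cases h2 : op = "$lt"
    · subst h2
      by_cases h : value < e <;> simp [h]
    · by_cases h3 : op = "$gte"
      · subst h3; by_cases h : value ≥ e <;> simp [h]
      · by_cases h4 : op = "$lte"
        · subst h4; by_cases h : value ≤ e <;> simp [h]
        · by_cases h5 : op = "$ne"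
          · subst h5; by_cases h : value = e <;> simp [h]
          · simp [h1, h2, h3, h4, h5]

-- ===== VERDICT =====
theorem match_condition_py_spec : Claim_equal_match_condition_py := by
  intro value condition _
  unfold Spec_match_condition_py
  rw [pvA_eq_all, pvB_eq_all]
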